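-- pv_equiv track=rewrite | github.com/kmccleary3301/breadboard | agentic_coder_prototype/ctrees/compiler.py | _kind_counts
-- ===== SOURCE A (Python) =====
-- from typing import Any, Dict, List, Optional
--
-- def _kind_counts(nodes: List[Dict[str, Any]]) -> Dict[str, int]:
--     counts: Dict[str, int] = {}
--     for node in nodes:
--         kind = str(node.get("kind") or "")
--         if not kind:
--             continue
--         counts[kind] = counts.get(kind, 0) + 1
--     return dict(sorted(counts.items(), key=lambda item: item[0]))
-- ===== SOURCE B (Python) =====
-- from typing import Any, Dict, List, Optional
--
-- def _kind_counts(nodes: List[Dict[str, Any]]) -> Dict[str, int]: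
--     kinds = sorted(k for k in (str(n.get("kind") or "") for n in nodes) if k)
--     out: Dict[str, int] = {}
--     i, n = 0, len(kinds)
--     while i < n:
--         j = i
--         while j < n and kinds[j] == kinds[i]:
--             j += 1
--         out[kinds[i]] = j - i
--         i = j
--     return out
-- ===== Notes on version B (the rewrite author's own statement) =====
-- stated objective: alternative
-- what changed: Replaces the hash-count-then-sort-keys strategy with sort-then-run-scan: normalize and filter the kind strings, sort that list once, and emit (kind, run length) for each maximal run, so keys come out already sorted and no dictionary counting pass exists.
import Mathlib
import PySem

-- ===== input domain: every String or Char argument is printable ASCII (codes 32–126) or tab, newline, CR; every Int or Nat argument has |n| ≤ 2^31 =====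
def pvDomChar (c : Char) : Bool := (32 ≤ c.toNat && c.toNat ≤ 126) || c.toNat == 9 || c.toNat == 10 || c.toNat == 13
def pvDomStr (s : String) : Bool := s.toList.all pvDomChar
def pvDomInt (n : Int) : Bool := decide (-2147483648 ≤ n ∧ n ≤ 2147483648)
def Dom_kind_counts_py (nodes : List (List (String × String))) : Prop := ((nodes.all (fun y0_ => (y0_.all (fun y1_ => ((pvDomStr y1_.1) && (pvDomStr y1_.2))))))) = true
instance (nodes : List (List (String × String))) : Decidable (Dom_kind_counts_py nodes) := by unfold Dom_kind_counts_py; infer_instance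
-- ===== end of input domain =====

-- B replaces A's hash-count-then-sort-keys strategy by sort-then-run-scan (same result, similar cost).

-- ===== PORT A =====
def kind_counts_py (nodes : List (List (String × String))) : List (String × Int) :=
  let counts : PySem.Dict String Int :=
    nodes.foldl (fun counts node =>
      let kind := ((PySem.Dict.mk node).get? "kind").getD ""
      if kind = "" then counts
      else counts.insert kind (counts.getD kind 0 + 1)) PySem.Dict.empty
  PySem.List.sorted counts.items (fun item => item.1) false

-- ===== PORT B =====
-- outer while loop of Source B: each step consumes one maximal run of equal kinds
def runLengths : List String → List (String × Int)
  | [] => []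
  | x :: rest =>
      (x, 1 + ((rest.takeWhile (· == x)).length : Int)) :: runLengths (rest.dropWhile (· == x))
termination_by l => l.length
decreasing_by
  simp only [List.length_cons]
  exact Nat.lt_succ_of_le (List.length_dropWhile_le _ _)

def kind_counts_py_alt (nodes : List (List (String × String))) : List (String × Int) :=
  let kinds := PySem.List.sorted (nodes.filterMap (fun node =>
      let k := ((PySem.Dict.mk node).get? "kind").getD ""
      if k = "" then none else some k)) (fun x => x) false
  runLengths kinds

-- ===== PRECONDITION & SPEC =====
def Spec_kind_counts_py (nodes : List (List (String × String))) (out : List (String × Int)) : Prop := out = kind_counts_py_alt nodes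
instance (nodes : List (List (String × String))) (out : List (String × Int)) : Decidable (Spec_kind_counts_py nodes out) := by unfold Spec_kind_counts_py; infer_instance

-- ===== CLAIM (what is proved, stated in full; the proofs are below) =====
def Claim_equal_kind_counts_py : Prop := ∀ (nodes : List (List (String × String))), Dom_kind_counts_py nodes → Spec_kind_counts_py nodes (kind_counts_py nodes)

-- ===== LEMMAS AND PROOFS =====

-- A's loop over nodes is the counting fold over the filtered kind strings
lemma loop_eq_filterMap (nodes : List (List (String × String))) (d : PySem.Dict String Int) :
    nodes.foldl (fun counts node =>
      let kind := ((PySem.Dict.mk node).get? "kind").getD ""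
      if kind = "" then counts
      else counts.insert kind (counts.getD kind 0 + 1)) d
    = (nodes.filterMap (fun node =>
        let k := ((PySem.Dict.mk node).get? "kind").getD ""
        if k = "" then none else some k)).foldl
        (fun d x => d.insert x (d.getD x 0 + 1)) d := by
  induction nodes generalizing d with
  | nil => rfl
  | cons n rest ih =>
      simp only [List.foldl_cons, List.filterMap_cons]
      split_ifs with h
      · simp [ih]
      · simp only [List.foldl_cons]
        exact ih _

lemma dropWhile_head_false {α : Type} (p : α → Bool) :
    ∀ (l : List α) (y : α) (t : List α), l.dropWhile p = y :: t → p y = false := by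
  intro l
  induction l with
  | nil => intro y t h; simp [List.dropWhile] at h
  | cons a l ih =>
      intro y t h
      by_cases hp : p a
      · rw [List.dropWhile_cons_of_pos hp] at h; exact ih y t h
      · rw [List.dropWhile_cons_of_neg hp] at h
        cases h; simpa using hp

-- characterization of runLengths on a ≤-sorted list
lemma runLengths_spec : ∀ (l : List String), l.Pairwise (· ≤ ·) →
    (∀ k, k ∈ (runLengths l).map Prod.fst ↔ k ∈ l) ∧
    (∀ p ∈ runLengths l, p.2 = (l.count p.1 : Int)) ∧
    (runLengths l).Pairwise (fun a b => a.1 < b.1) := by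
  intro l
  induction l using runLengths.induct with
  | case1 => intro _; refine ⟨by simp [runLengths], by simp [runLengths], by simp [runLengths]⟩
  | case2 x rest ih =>
      intro h
      rw [List.pairwise_cons] at h
      obtain ⟨h1, hrest⟩ := h
      set t := rest.takeWhile (· == x) with ht
      set d := rest.dropWhile (· == x) with hd
      have hsplit : t ++ d = rest := List.takeWhile_append_dropWhile
      have htx : ∀ y ∈ t, y = x := by
        intro y hy
        have := List.mem_takeWhile_imp hy
        simpa [eq_comm] using eq_of_beq this
      have hdpw : d.Pairwise (· ≤ ·) := by
        exact hrest.sublist (List.dropWhile_sublist _)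
      have F : ∀ z ∈ d, x < z := by
        cases hdc : d with
        | nil => simp
        | cons y d' =>
            intro z hz
            have hy0 : (y == x) = false := dropWhile_head_false _ rest y d' (hd ▸ hdc)
            have hyne : y ≠ x := by simpa using hy0
            have hymem : y ∈ rest := by
              have : y ∈ d := by rw [hdc]; simp
              exact (List.dropWhile_sublist _).subset this
            have hxy : x < y := lt_of_le_of_ne (h1 y hymem) (Ne.symm hyne)
            rcases List.mem_cons.mp hz with rfl | hz'
            · exact hxy
            · have := (List.pairwise_cons.mp (hdc ▸ hdpw)).1 z hz'
              exact lt_of_lt_of_le hxy this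
      have ihs := ih hdpw
      have hmemd : ∀ p ∈ runLengths d, p.1 ∈ d := by
        intro p hp
        exact (ihs.1 p.1).mp (List.mem_map.mpr ⟨p, hp, rfl⟩)
      have hxnotd : x ∉ d := fun hx => lt_irrefl x (F x hx)
      have hcount_t : t.count x = t.length := List.count_eq_length.mpr (fun b hb => (htx b hb).symm)
      have hcount_rest_x : rest.count x = t.length := by
        rw [← hsplit, List.count_append, hcount_t, List.count_eq_zero.mpr hxnotd]
        omega
      refine ⟨?_, ?_, ?_⟩
      · intro k
        rw [runLengths]
        simp only [List.map_cons, List.mem_cons]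
        rw [← hd, ihs.1 k, ← hsplit]
        simp only [List.mem_append]
        constructor
        · rintro (rfl | hk)
          · exact Or.inl rfl
          · exact Or.inr (Or.inr hk)
        · rintro (rfl | hk | hk)
          · exact Or.inl rfl
          · exact Or.inl (htx k hk)
          · exact Or.inr hk
      · intro p hp
        rw [runLengths] at hp
        rcases List.mem_cons.mp hp with rfl | hp'
        · simp only [List.count_cons_self, hcount_rest_x]
          push_cast
          ring
        · rw [← hd] at hp'
          have hp1d : p.1 ∈ d := hmemd p hp'
          have hpne : p.1 ≠ x := fun he => hxnotd (he ▸ hp1d)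
          have hcnt_t : t.count p.1 = 0 := List.count_eq_zero.mpr
            (fun hm => hpne (htx _ hm))
          have : (x :: rest).count p.1 = d.count p.1 := by
            rw [List.count_cons_of_ne (Ne.symm hpne), ← hsplit, List.count_append, hcnt_t]
            omega
          rw [this, ihs.2.1 p hp']
      · rw [runLengths]
        refine List.pairwise_cons.mpr ⟨?_, ?_⟩
        · intro q hq
          exact F q.1 (hmemd q (hd ▸ hq))
        · exact hd ▸ ihs.2.2

lemma kind_counts_eq (nodes : List (List (String × String))) :
    kind_counts_py nodes = kind_counts_py_alt nodes := by
  unfold kind_counts_py kind_counts_py_alt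
  set ks := nodes.filterMap (fun node =>
      let k := ((PySem.Dict.mk node).get? "kind").getD ""
      if k = "" then none else some k) with hks
  rw [loop_eq_filterMap, ← hks, PySem.Dict.foldl_insert_getD_add_one_eq_counter]
  set s := PySem.List.sorted ks (fun x => x) false with hs
  have hspw : s.Pairwise (· ≤ ·) := PySem.List.sorted_pairwise ks (fun x => x)
  have hperm : s.Perm ks := PySem.List.sorted_perm ks (fun x => x) false
  obtain ⟨hmem, hcnt, hpw⟩ := runLengths_spec s hspw
  set R := runLengths s with hR
  -- R rebuilt from its keys
  have hRmap : R = (R.map Prod.fst).map (fun k => (k, (ks.count k : Int))) := by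
    rw [List.map_map]
    conv_lhs => rw [← List.map_id R]
    refine List.map_congr_left ?_
    intro p hp
    have h2 := hcnt p hp
    have : s.count p.1 = ks.count p.1 := hperm.count_eq p.1
    rw [this] at h2
    simp [Function.comp, ← h2]
  have hknodup : (R.map Prod.fst).Nodup := by
    exact (List.pairwise_map.mpr hpw).imp ne_of_lt
  have hkperm : (R.map Prod.fst).Perm (PySem.Set.ofList ks) := by
    rw [List.perm_ext_iff_of_nodup hknodup (PySem.Set.nodup_ofList ks)]
    intro a
    rw [hmem a, hperm.mem_iff, PySem.Set.mem_ofList]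
  have hRperm : R.Perm ((PySem.Set.ofList ks).map (fun k => (k, (ks.count k : Int)))) := by
    rw [hRmap]
    exact (hkperm.map _)
  exact PySem.List.sorted_eq_of_perm_of_pairwise_lt _ R (fun item => item.1)
    (by rw [PySem.Dict.items_counter]; exact hRperm) hpw

-- ===== VERDICT (by name: the statement is the Claim_ definition above) =====
theorem kind_counts_py_spec : Claim_equal_kind_counts_py := by
  intro nodes _
  unfold Spec_kind_counts_py
  exact kind_counts_eq nodes
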